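-- pv_equiv track=rewrite | github.com/isaacsaffold/pyutils | math/sequences.py | bit_inversions
-- ===== SOURCE A (Python) =====
-- def hamming_weight(n, subseq=None):
--     """Returns the Hamming weights of all non-negative integers in the
--     interval [0, 2**n).
--
--     The terms of this sequence are generated via a recurrence relation.
--     If 'subseq' is passed all the terms in [0, 2**(n-1)), the rest of
--     of the terms can be generated more efficiently.
--     """
--     weights = subseq if subseq else [0]
--     while len(weights) < 2**n:
--         for i in weights.copy():
--             weights.append(i + 1)
--     return weights
--
-- def bit_inversions(n):
--     """Yields the number of inversions required to shift all the ones
--     in a binary number to the right side, for all non-negative integers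
--     less than 2**n."""
--     yield 0
--     terms = [0]
--     weights = [0]
--     for i in range(n):
--         weights = hamming_weight(i, weights)
--         for j in range(len(weights)):
--             term = terms[j] + weights[-(j + 1)]
--             yield term
--             terms.append(term)
-- ===== SOURCE B (Python) =====
-- def bit_inversions(n):
--     """Yields the number of inversions required to shift all the ones
--     in a binary number to the right side, for all non-negative integers
--     less than 2**n."""
--     for k in range(2 ** max(n, 0)):
--         inv = 0
--         zeros = 0
--         while k > 0:
--             if k & 1:
--                 inv += zeros
--             else:
--                 zeros += 1
--             k >>= 1
--         yield inv
-- ===== Notes on version B (the rewrite author's own statement) =====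
-- stated objective: simpler
-- what changed: Replaces A's recurrence over growing terms/hamming-weight tables (with its helper and negative table indexing) by a direct per-integer bit scan: for each integer in the output range, add the zeros seen so far for every one bit while shifting it right.
import Mathlib
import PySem

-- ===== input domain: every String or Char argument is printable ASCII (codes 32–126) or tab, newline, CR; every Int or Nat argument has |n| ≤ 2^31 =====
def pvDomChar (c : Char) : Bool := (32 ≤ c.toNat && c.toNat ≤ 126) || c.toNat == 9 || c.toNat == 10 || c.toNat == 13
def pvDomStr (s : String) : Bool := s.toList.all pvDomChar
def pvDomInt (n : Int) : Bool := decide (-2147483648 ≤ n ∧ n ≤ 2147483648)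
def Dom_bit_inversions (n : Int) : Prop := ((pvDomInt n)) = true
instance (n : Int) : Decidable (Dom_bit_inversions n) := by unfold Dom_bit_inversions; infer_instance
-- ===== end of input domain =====

-- B computes each inversion count directly from the integer's bits instead of A's
-- recurrence over growing hamming-weight/terms tables (objective: simpler; not faster).

-- ===== PORT A =====
-- the 'while len(weights) < 2**n' loop of hamming_weight; 'weights = []' branch is a
-- totalization guard only (Python would loop forever there; never reached: weights starts nonempty)
def pvHwLoop (target : Nat) (weights : List Int) : List Int :=
  if hlt : weights.length < target then
    if h : weights = [] then weights
    else pvHwLoop target (weights ++ weights.map (· + 1))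
  else weights
termination_by target - weights.length
decreasing_by
  have : 0 < weights.length := List.length_pos_iff.mpr h
  simp only [List.length_append, List.length_map, List.length_attach]
  omega

-- subseq=None default unused: A always passes a list; 2 ^ n.toNat is exact at every
-- call site (A calls with 0 ≤ n)
def hamming_weight (n : Int) (subseq : List Int) : List Int :=
  let weights := if subseq ≠ [] then subseq else [0]
  pvHwLoop (2 ^ n.toNat) weights

-- generator collected into a list; state = (yielded, terms, weights); the .getD 0 after
-- pyGet? is unreachable (both indices are always in range, as the proofs below show)
def bit_inversions (n : Int) : List Int :=
  (((PySem.List.pyRange 0 n 1).foldl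
      (fun (st : List Int × List Int × List Int) i =>
        let weights := hamming_weight i st.2.2
        let inner :=
          (PySem.List.pyRange 0 (weights.length : Int) 1).foldl
            (fun (p : List Int × List Int) j =>
              let term := (PySem.List.pyGet? p.2 j).getD 0 +
                          (PySem.List.pyGet? weights (-(j + 1))).getD 0
              (p.1 ++ [term], p.2 ++ [term]))
            (st.1, st.2.1)
        (inner.1, inner.2, weights))
      ([0], [0], [0]))).1

-- ===== PORT B =====
-- the 'while k > 0' loop of Source B: add the zeros seen so far for each one bit
def pvInvLoop (k zeros : Nat) (inv : Int) : Int :=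
  if 0 < k then
    if k % 2 = 1 then pvInvLoop (k / 2) zeros (inv + zeros)
    else pvInvLoop (k / 2) (zeros + 1) inv
  else inv
termination_by k
decreasing_by all_goals omega

def bit_inversions_alt (n : Int) : List Int :=
  (List.range (2 ^ (max n 0).toNat)).map (fun k => pvInvLoop k 0 0)

-- ===== PRECONDITION & SPEC =====
def Spec_bit_inversions (n : Int) (out : List Int) : Prop := out = bit_inversions_alt n
instance (n : Int) (out : List Int) : Decidable (Spec_bit_inversions n out) := by unfold Spec_bit_inversions; infer_instance

-- ===== CLAIM (what is proved, stated in full; the proofs are below) =====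
def Claim_equal_bit_inversions : Prop := ∀ (n : Int), Dom_bit_inversions n → Spec_bit_inversions n (bit_inversions n)

-- ===== LEMMAS AND PROOFS =====

-- Hamming weight (number of one bits)
def pvWt : Nat → Nat
  | 0 => 0
  | k + 1 => (k + 1) % 2 + pvWt ((k + 1) / 2)
decreasing_by omega

lemma pvWt_zero : pvWt 0 = 0 := by rw [pvWt]

lemma pvWt_step (m : Nat) : pvWt m = m % 2 + pvWt (m / 2) := by
  cases m with
  | zero => rw [pvWt]
  | succ k => rw [pvWt]

-- shorthand: B's per-integer inversion count
def pvF (k : Nat) : Int := pvInvLoop k 0 0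

lemma pvInvLoop_zero (z : Nat) (inv : Int) : pvInvLoop 0 z inv = inv := by
  rw [pvInvLoop]; simp

lemma pvInvLoop_odd (k z : Nat) (inv : Int) (hk : k % 2 = 1) :
    pvInvLoop k z inv = pvInvLoop (k / 2) z (inv + z) := by
  rw [pvInvLoop]; simp [hk, show 0 < k by omega]

lemma pvInvLoop_even (k z : Nat) (inv : Int) (hk0 : 0 < k) (hk : k % 2 = 0) :
    pvInvLoop k z inv = pvInvLoop (k / 2) (z + 1) inv := by
  rw [pvInvLoop]; simp [hk0, hk]

lemma pvF_zero : pvF 0 = 0 := by rw [pvF, pvInvLoop_zero]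

lemma pvWt_pow_add (i : Nat) : ∀ m, m < 2 ^ i → pvWt (2 ^ i + m) = 1 + pvWt m := by
  induction i with
  | zero =>
      intro m hm
      interval_cases m
      rw [pvWt_step]
      simp [pvWt_zero]
  | succ i ih =>
      intro m hm
      have h2 : 2 ^ (i + 1) = 2 * 2 ^ i := by ring
      rw [pvWt_step (2 ^ (i + 1) + m), pvWt_step m]
      have e1 : (2 ^ (i + 1) + m) % 2 = m % 2 := by omega
      have e2 : (2 ^ (i + 1) + m) / 2 = 2 ^ i + m / 2 := by omega
      rw [e1, e2, ih (m / 2) (by omega)]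
      omega

lemma pvWt_compl (i : Nat) : ∀ j, j < 2 ^ i → pvWt j + pvWt (2 ^ i - 1 - j) = i := by
  induction i with
  | zero => intro j hj; interval_cases j; simp [pvWt_zero]
  | succ i ih =>
      intro j hj
      have h2 : 2 ^ (i + 1) = 2 * 2 ^ i := by ring
      set m := 2 ^ (i + 1) - 1 - j with hm
      rw [pvWt_step j, pvWt_step m]
      have e1 : m % 2 = 1 - j % 2 := by omega
      have e2 : m / 2 = 2 ^ i - 1 - j / 2 := by omega
      rw [e1, e2]
      have := ih (j / 2) (by omega)
      omega

lemma pvInvLoop_acc (k : Nat) : ∀ z inv, pvInvLoop k z inv = inv + z * pvWt k + pvF k := by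
  induction k using Nat.strong_induction_on with
  | _ k ih =>
      intro z inv
      by_cases hk : 0 < k
      · have hlt : k / 2 < k := by omega
        by_cases hodd : k % 2 = 1
        · rw [pvInvLoop_odd k z inv hodd, ih _ hlt,
              show pvF k = pvInvLoop (k / 2) 0 ((0 : Int) + (0 : Nat)) from
                by rw [pvF, pvInvLoop_odd k 0 0 hodd],
              ih _ hlt, pvWt_step k, hodd]
          push_cast; ring
        · have heven : k % 2 = 0 := by omega
          rw [pvInvLoop_even k z inv hk heven, ih _ hlt,
              show pvF k = pvInvLoop (k / 2) (0 + 1) 0 from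
                by rw [pvF, pvInvLoop_even k 0 0 hk heven],
              ih _ hlt, pvWt_step k, heven]
          push_cast; ring
      · have : k = 0 := by omega
        subst this
        simp [pvInvLoop_zero, pvF_zero, pvWt_zero]

-- B's recurrence: the leading one bit of 2^i + j contributes the zero bits of j below it
lemma pvF_rec (i : Nat) : ∀ j, j < 2 ^ i → pvF (2 ^ i + j) = pvF j + i - pvWt j := by
  induction i with
  | zero =>
      intro j hj
      interval_cases j
      rw [show (2 : Nat) ^ 0 + 0 = 1 by norm_num, pvF, pvInvLoop_odd 1 0 0 (by norm_num)]
      norm_num [pvInvLoop_zero, pvF_zero, pvWt_zero]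
  | succ i ih =>
      intro j hj
      have h2 : 2 ^ (i + 1) = 2 * 2 ^ i := by ring
      have hq : j / 2 < 2 ^ i := by omega
      have e2 : (2 ^ (i + 1) + j) / 2 = 2 ^ i + j / 2 := by omega
      by_cases hodd : j % 2 = 1
      · have e1 : (2 ^ (i + 1) + j) % 2 = 1 := by omega
        have hFj : pvF j = pvF (j / 2) := by
          rw [pvF, pvInvLoop_odd j 0 0 hodd, pvF]
          norm_num
        rw [pvF, pvInvLoop_odd _ 0 0 e1, e2]
        rw [show ((0 : Int) + ((0 : Nat) : Int)) = 0 by norm_num]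
        rw [show pvInvLoop (2 ^ i + j / 2) 0 0 = pvF (2 ^ i + j / 2) from rfl]
        rw [ih _ hq, hFj, pvWt_step j, hodd]
        push_cast; ring
      · have heven : j % 2 = 0 := by omega
        have e1 : (2 ^ (i + 1) + j) % 2 = 0 := by omega
        rw [pvF, pvInvLoop_even _ 0 0 (by positivity) e1, e2, pvInvLoop_acc]
        rw [ih _ hq]
        have hwadd := pvWt_pow_add i (j / 2) hq
        have hFj : pvF j = pvWt (j / 2) + pvF (j / 2) := by
          by_cases hj0 : j = 0
          · subst hj0
            simp [pvF_zero, pvWt_zero, Nat.zero_div]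
          · rw [pvF, pvInvLoop_even j 0 0 (by omega) heven, pvInvLoop_acc]
            push_cast [pvF]; ring
        have hwj : pvWt j = pvWt (j / 2) := by rw [pvWt_step j]; omega
        rw [hFj, hwj, hwadd]
        push_cast; ring

-- weights table after hamming_weight i is the hamming weights of [0, 2^i)
def pvWtI (k : Nat) : Int := (pvWt k : Int)

lemma pvHwLoop_wt (m : Nat) : ∀ d t, t ≤ m → m - t = d →
    pvHwLoop (2 ^ m) ((List.range (2 ^ t)).map pvWtI) = (List.range (2 ^ m)).map pvWtI := by
  intro d
  induction d with
  | zero =>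
      intro t ht hd
      have : t = m := by omega
      subst this
      rw [pvHwLoop.eq_def]
      simp
  | succ d ih =>
      intro t ht hd
      have htm : t < m := by omega
      have hlt : 2 ^ t < 2 ^ m := Nat.pow_lt_pow_right (by norm_num) htm
      have hne : (List.range (2 ^ t)).map pvWtI ≠ [] := by
        simp only [ne_eq, List.map_eq_nil_iff, List.range_eq_nil]
        positivity
      rw [pvHwLoop.eq_def, dif_pos (by simp [hlt]), dif_neg hne]
      have hdouble : (List.range (2 ^ t)).map pvWtI ++ ((List.range (2 ^ t)).map pvWtI).map (· + 1)
          = (List.range (2 ^ (t + 1))).map pvWtI := by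
        rw [show 2 ^ (t + 1) = 2 ^ t + 2 ^ t by ring, List.range_add, List.map_append,
            List.map_map, List.map_map]
        congr 1
        apply List.map_congr_left
        intro k hk
        simp only [Function.comp_apply, pvWtI]
        rw [pvWt_pow_add t k (List.mem_range.mp hk)]
        push_cast; ring
      rw [hdouble]
      exact ih (t + 1) (by omega) (by omega)

-- one pass of A's inner loop appends the next block of values pvF (2^m + ·)
lemma pvInner_lemma (m : Nat) : ∀ (c j0 : Nat), j0 ≤ 2 ^ m → c = 2 ^ m - j0 →
    (PySem.List.pyRange (j0 : Int) ((2 : Int) ^ m) 1).foldl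
      (fun (p : List Int × List Int) j =>
        let term := (PySem.List.pyGet? p.2 j).getD 0 +
                    (PySem.List.pyGet? ((List.range (2 ^ m)).map pvWtI) (-(j + 1))).getD 0
        (p.1 ++ [term], p.2 ++ [term]))
      ((List.range (2 ^ m)).map pvF ++ (List.range j0).map (fun t => pvF (2 ^ m + t)),
       (List.range (2 ^ m)).map pvF ++ (List.range j0).map (fun t => pvF (2 ^ m + t)))
    = ((List.range (2 ^ (m + 1))).map pvF, (List.range (2 ^ (m + 1))).map pvF) := by
  intro c
  induction c with
  | zero =>
      intro j0 hle hc
      have : j0 = 2 ^ m := by omega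
      subst this
      rw [PySem.List.pyRange_one_eq_nil (by norm_num)]
      have : (List.range (2 ^ (m + 1))).map pvF
          = (List.range (2 ^ m)).map pvF ++ (List.range (2 ^ m)).map (fun t => pvF (2 ^ m + t)) := by
        rw [show 2 ^ (m + 1) = 2 ^ m + 2 ^ m by ring, List.range_add, List.map_append, List.map_map]
        rfl
      rw [List.foldl_nil, this]
  | succ c ih =>
      intro j0 hle hc
      have hj : j0 < 2 ^ m := by omega
      have hjI : (j0 : Int) < (2 : Int) ^ m := by exact_mod_cast hj
      rw [PySem.List.pyRange_one_cons hjI, List.foldl_cons]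
      have hlenT : ((List.range (2 ^ m)).map pvF).length = 2 ^ m := by simp
      have hget1 : (PySem.List.pyGet? ((List.range (2 ^ m)).map pvF ++
            (List.range j0).map (fun t => pvF (2 ^ m + t))) (j0 : Int)).getD 0 = pvF j0 := by
        rw [PySem.List.pyGet?_natCast]
        rw [List.getElem?_append_left (by simp [hj])]
        simp [hj]
      have hget2 : (PySem.List.pyGet? ((List.range (2 ^ m)).map pvWtI)
            (-((j0 : Int) + 1))).getD 0 = pvWtI (2 ^ m - 1 - j0) := by
        rw [show -((j0 : Int) + 1) = -((j0 + 1 : Nat) : Int) by push_cast; ring]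
        rw [PySem.List.pyGet?_neg_natCast _ (j0 + 1) (by omega) (by simp; omega)]
        simp only [List.length_map, List.length_range]
        rw [List.getElem?_map]
        rw [List.getElem?_range (by omega)]
        simp [show 2 ^ m - (j0 + 1) = 2 ^ m - 1 - j0 by omega]
      have hterm : pvF j0 + pvWtI (2 ^ m - 1 - j0) = pvF (2 ^ m + j0) := by
        have h1 := pvF_rec m j0 hj
        have h2 := pvWt_compl m j0 hj
        have h3 : (pvWtI (2 ^ m - 1 - j0) : Int) = (m : Int) - pvWt j0 := by
          rw [pvWtI]; omega
        rw [h1, h3]; ring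
      simp only [hget1, hget2, hterm]
      have hD : ((List.range (2 ^ m)).map pvF ++ (List.range j0).map (fun t => pvF (2 ^ m + t)))
            ++ [pvF (2 ^ m + j0)]
          = (List.range (2 ^ m)).map pvF ++ (List.range (j0 + 1)).map (fun t => pvF (2 ^ m + t)) := by
        rw [List.append_assoc, List.range_succ, List.map_append]
        rfl
      rw [hD, show (j0 : Int) + 1 = ((j0 + 1 : Nat) : Int) by push_cast; ring]
      exact ih (j0 + 1) (by omega) (by omega)

-- outer invariant: after the first m iterations the state is (terms, terms, weights table)
lemma pvOuter_inv (m : Nat) :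
    (PySem.List.pyRange 0 (m : Int) 1).foldl
      (fun (st : List Int × List Int × List Int) i =>
        let weights := hamming_weight i st.2.2
        let inner :=
          (PySem.List.pyRange 0 (weights.length : Int) 1).foldl
            (fun (p : List Int × List Int) j =>
              let term := (PySem.List.pyGet? p.2 j).getD 0 +
                          (PySem.List.pyGet? weights (-(j + 1))).getD 0
              (p.1 ++ [term], p.2 ++ [term]))
            (st.1, st.2.1)
        (inner.1, inner.2, weights))
      ([0], [0], [0])
    = ((List.range (2 ^ m)).map pvF, (List.range (2 ^ m)).map pvF,
       (List.range (2 ^ (m - 1))).map pvWtI) := by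
  induction m with
  | zero =>
      rw [PySem.List.pyRange_one_eq_nil (by norm_num), List.foldl_nil]
      simp [pvF_zero, pvWtI, pvWt_zero]
  | succ m ih =>
      rw [show ((m + 1 : Nat) : Int) = (m : Int) + 1 by push_cast; ring,
          PySem.List.pyRange_one_succ_right (by positivity), List.foldl_append, ih,
          List.foldl_cons, List.foldl_nil]
      have hW : hamming_weight (m : Int) ((List.range (2 ^ (m - 1))).map pvWtI)
          = (List.range (2 ^ m)).map pvWtI := by
        rw [hamming_weight]
        have hne : (List.range (2 ^ (m - 1))).map pvWtI ≠ [] := by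
          simp only [ne_eq, List.map_eq_nil_iff, List.range_eq_nil]
          positivity
        simp only [hne, if_true, ne_eq, not_false_eq_true, Int.toNat_natCast]
        exact pvHwLoop_wt m (m - (m - 1)) (m - 1) (by omega) rfl
      simp only [hW]
      have hlen : (((List.range (2 ^ m)).map pvWtI).length : Int) = (2 : Int) ^ m := by
        simp
      have hinner := pvInner_lemma m (2 ^ m) 0 (Nat.zero_le _) (Nat.sub_zero _).symm
      simp only [List.range_zero, List.map_nil, List.append_nil, Nat.cast_zero] at hinner
      rw [hlen, hinner]
      simp

-- ===== VERDICT (by name: the statement is the Claim_ definition above) =====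
theorem bit_inversions_spec : Claim_equal_bit_inversions := by
  intro n _
  unfold Spec_bit_inversions bit_inversions bit_inversions_alt
  by_cases hn : 0 ≤ n
  · obtain ⟨m, rfl⟩ := Int.eq_ofNat_of_zero_le hn
    rw [show (max ((m : Int)) 0).toNat = m by omega, pvOuter_inv m]
    rfl
  · rw [PySem.List.pyRange_one_eq_nil (by omega), List.foldl_nil,
        show (max n 0).toNat = 0 by omega]
    simp only [pow_zero, List.range_one, List.map_cons, List.map_nil]
    rw [pvInvLoop_zero]
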